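-- pv_equiv track=rewrite | github.com/carlosvpadilla/python-code-challenge-examples | src/greedy_algorithms/compression.py | constant_length_compress
-- ===== SOURCE A (Python) =====
-- def constant_length_compress(input: str) -> int:
--     codewords = {
--         "A": 0b0,
--         "B": 0b1,
--         "C": 0b10,
--         "D": 0b11
--     }
--     compressed_input = 0b1
--     length = 0
--     for char in input:
--         compressed_input = compressed_input << 2
--         compressed_input |= codewords[char]
--         length += 2
--     return compressed_input
-- ===== SOURCE B (Python) =====
-- def constant_length_compress(input: str) -> int:
--     codewords = {
--         "A": 0b0,
--         "B": 0b1,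
--         "C": 0b10,
--         "D": 0b11
--     }
--     bits = "1" + "".join(format(codewords[c], "02b") for c in input)
--     return int(bits, 2)
-- ===== Notes on version B (the rewrite author's own statement) =====
-- stated objective: idiomatic
-- what changed: B builds the whole compressed representation as a bit-string ('1' sentinel plus each character's 02b codeword) and parses it once with int(bits, 2), instead of A's per-character shift/OR accumulation.
import Mathlib
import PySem

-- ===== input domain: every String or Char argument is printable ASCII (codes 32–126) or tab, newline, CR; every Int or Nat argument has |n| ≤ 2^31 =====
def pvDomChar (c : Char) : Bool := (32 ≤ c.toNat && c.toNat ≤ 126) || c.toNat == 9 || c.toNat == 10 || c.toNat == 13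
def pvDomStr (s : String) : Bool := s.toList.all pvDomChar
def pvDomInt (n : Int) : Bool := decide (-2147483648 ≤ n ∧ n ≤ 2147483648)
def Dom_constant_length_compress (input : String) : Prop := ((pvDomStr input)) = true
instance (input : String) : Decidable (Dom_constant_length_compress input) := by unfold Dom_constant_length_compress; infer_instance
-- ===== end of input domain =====

-- B builds the whole bit-string ('1' sentinel + 2-bit codewords) and parses it once, instead of A's per-character shift/OR accumulation; objective: idiomatic.

-- ===== PORT A =====
-- the dict literal 'codewords'
def pvCodewords : PySem.Dict Char Int :=
  PySem.Dict.ofList [('A', 0), ('B', 1), ('C', 2), ('D', 3)]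

-- codewords[char]; KeyError (get? = none) is excluded by Pre_, the default is never used there
def pvCode (c : Char) : Int := (pvCodewords.get? c).getD 0

-- the loop body: compressed <<= 2; compressed |= codewords[char]; length += 2
def pvStepA (st : Int × Int) (char : Char) : Int × Int :=
  (PySem.Int.bor (st.1 <<< (2:Nat)) (pvCode char), st.2 + 2)

def constant_length_compress (input : String) : Int :=
  (input.toList.foldl pvStepA (1, 0)).1

-- ===== PORT B =====
-- B's own dict literal 'codewords' and lookup (codewords[c]; KeyError excluded by Pre_)
def pvCodewordsB : PySem.Dict Char Int :=
  PySem.Dict.ofList [('A', 0), ('B', 1), ('C', 2), ('D', 3)]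

def pvCodeB (c : Char) : Int := (pvCodewordsB.get? c).getD 0

-- format(k, '02b') for 0 ≤ k < 4 (the only values B feeds it): exact on that domain
def pvFmt02b (k : Int) : List Char :=
  [if 2 ≤ k then '1' else '0', if PySem.Int.mod k 2 = 1 then '1' else '0']

-- one step of int(bits, 2) over a '0'/'1' digit list (hand port of the base-2 parse)
def pvStepB (acc : Int) (ch : Char) : Int :=
  acc * 2 + (if ch = '1' then 1 else 0)

def constant_length_compress_alt (input : String) : Int :=
  let bits : List Char := '1' :: input.toList.flatMap (fun c => pvFmt02b (pvCodeB c))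
  bits.foldl pvStepB 0

-- ===== PRECONDITION & SPEC =====
-- Pre_ excludes exactly the inputs containing a character outside the codeword table,
-- on which Python A (and B) raise KeyError.
def Pre_constant_length_compress (input : String) : Prop :=
  (input.toList.all (fun c => c == 'A' || c == 'B' || c == 'C' || c == 'D')) = true
instance (input : String) : Decidable (Pre_constant_length_compress input) := by
  unfold Pre_constant_length_compress; infer_instance

def pvWitness_constant_length_compress : String := "BADC"

def Spec_constant_length_compress (input : String) (out : Int) : Prop := out = constant_length_compress_alt input
instance (input : String) (out : Int) : Decidable (Spec_constant_length_compress input out) := by unfold Spec_constant_length_compress; infer_instance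

-- ===== CLAIM (what is proved, stated in full; the proofs are below) =====
def Claim_equal_constant_length_compress : Prop := ∀ (input : String), Dom_constant_length_compress input → Pre_constant_length_compress input → Spec_constant_length_compress input (constant_length_compress input)

-- ===== LEMMAS AND PROOFS =====

theorem pv_or4 (m k : Nat) (hk : k < 4) : 4*m ||| k = 4*m + k := by
  apply Nat.eq_of_testBit_eq
  intro i
  rw [Nat.testBit_or]
  match i with
  | 0 =>
    simp only [Nat.testBit_zero, ← Bool.decide_or, decide_eq_decide]
    omega
  | 1 =>
    simp only [Nat.testBit_succ, Nat.testBit_zero, ← Bool.decide_or, decide_eq_decide]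
    omega
  | (n+2) =>
    simp only [Nat.testBit_succ]
    have h1 : (4*m)/2/2 = m := by omega
    have h2 : (4*m+k)/2/2 = m := by omega
    have hk2 : k/2/2 = 0 := by omega
    rw [h1, h2, hk2]
    simp

theorem pv_bor_shift (acc k : Int) (h : 0 ≤ acc) (hk0 : 0 ≤ k) (hk : k < 4) :
    PySem.Int.bor (acc <<< (2:Nat)) k = acc * 4 + k := by
  obtain ⟨m, rfl⟩ := Int.eq_ofNat_of_zero_le h
  obtain ⟨j, rfl⟩ := Int.eq_ofNat_of_zero_le hk0
  have hs : (m : Int) <<< (2:Nat) = ((4 * m : Nat) : Int) := by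
    rw [Int.shiftLeft_eq']; push_cast; ring
  rw [hs, PySem.Int.bor_natCast, pv_or4 m j (by exact_mod_cast hk)]
  push_cast; ring

-- one character: A's shift/OR step equals B's two parse steps, for each codeword char
theorem pv_char_step (acc : Int) (h : 0 ≤ acc) (c : Char)
    (hc : c = 'A' ∨ c = 'B' ∨ c = 'C' ∨ c = 'D') :
    PySem.Int.bor (acc <<< (2:Nat)) (pvCode c) = (pvFmt02b (pvCodeB c)).foldl pvStepB acc := by
  rcases hc with rfl | rfl | rfl | rfl
  · have hk : pvCode 'A' = 0 := by decide
    have hkB : pvCodeB 'A' = 0 := by decide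
    rw [hk, hkB, pv_bor_shift acc 0 h (by decide) (by decide)]
    have hf : pvFmt02b 0 = ['0', '0'] := by decide
    rw [hf]; simp [pvStepB]; ring
  · have hk : pvCode 'B' = 1 := by decide
    have hkB : pvCodeB 'B' = 1 := by decide
    rw [hk, hkB, pv_bor_shift acc 1 h (by decide) (by decide)]
    have hf : pvFmt02b 1 = ['0', '1'] := by decide
    rw [hf]; simp [pvStepB]; ring
  · have hk : pvCode 'C' = 2 := by decide
    have hkB : pvCodeB 'C' = 2 := by decide
    rw [hk, hkB, pv_bor_shift acc 2 h (by decide) (by decide)]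
    have hf : pvFmt02b 2 = ['1', '0'] := by decide
    rw [hf]; simp [pvStepB]; ring
  · have hk : pvCode 'D' = 3 := by decide
    have hkB : pvCodeB 'D' = 3 := by decide
    rw [hk, hkB, pv_bor_shift acc 3 h (by decide) (by decide)]
    have hf : pvFmt02b 3 = ['1', '1'] := by decide
    rw [hf]; simp [pvStepB]; ring

theorem pv_loop (l : List Char) (acc len : Int) (h : 0 ≤ acc)
    (hl : ∀ c ∈ l, c = 'A' ∨ c = 'B' ∨ c = 'C' ∨ c = 'D') :
    (l.foldl pvStepA (acc, len)).1 = (l.flatMap (fun c => pvFmt02b (pvCodeB c))).foldl pvStepB acc := by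
  induction l generalizing acc len with
  | nil => simp
  | cons c t ih =>
    have hc := hl c (by simp)
    have hcode : 0 ≤ pvCode c ∧ pvCode c < 4 := by
      rcases hc with rfl | rfl | rfl | rfl <;> decide
    have hacc' : 0 ≤ PySem.Int.bor (acc <<< (2:Nat)) (pvCode c) := by
      rw [pv_bor_shift acc _ h hcode.1 hcode.2]; omega
    simp only [List.foldl_cons, List.flatMap_cons, List.foldl_append, pvStepA]
    rw [ih _ (len + 2) hacc' (fun d hd => hl d (by simp [hd])), pv_char_step acc h c hc]

-- ===== VERDICT (by name: the statement is the Claim_ definition above) =====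
theorem constant_length_compress_spec : Claim_equal_constant_length_compress := by
  intro input _ hpre
  have hl : ∀ c ∈ input.toList, c = 'A' ∨ c = 'B' ∨ c = 'C' ∨ c = 'D' := by
    intro c hc
    have := List.all_eq_true.mp hpre c hc
    simp at this; tauto
  unfold Spec_constant_length_compress constant_length_compress constant_length_compress_alt
  simp only [List.foldl_cons]
  have h1 : pvStepB 0 '1' = 1 := by decide
  rw [h1, ← pv_loop input.toList 1 0 (by norm_num) hl]
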